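-- pv_equiv track=rewrite | github.com/chuquanpho297/text-to-sql | mschema_implementation.py | get_sample_values
-- ===== SOURCE A (Python) =====
-- from typing import Dict, List
--
-- def get_sample_values(
--     table_data: List[Dict], column_name: str, max_samples: int = 5
-- ) -> List:
--     """
--     Extract sample values for a column from table data.
--
--     Args:
--         table_data: List of row dictionaries
--         column_name: Name of the column
--         max_samples: Maximum number of sample values to return
--
--     Returns:
--         List of sample values
--     """
--     if not table_data:
--         return []
--
--     values = []
--     for row in table_data:
--         if column_name in row and row[column_name] != "NULL":
--             value = row[column_name]
--             if value not in values:
--                 values.append(value)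
--                 if len(values) >= max_samples:
--                     break
--
--     return values
-- ===== SOURCE B (Python) =====
-- def get_sample_values(table_data, column_name, max_samples=5):
--     if max_samples <= 0:
--         return []
--     vals = [
--         row[column_name]
--         for row in table_data
--         if column_name in row and row[column_name] != "NULL"
--     ]
--     uniq = [v for i, v in enumerate(vals) if vals.index(v) == i]
--     return uniq[:max_samples]
-- ===== Notes on version B (the rewrite author's own statement) =====
-- stated objective: alternative
-- what changed: Replaces A's single early-breaking loop with a seen-list accumulator by staged full-list passes: a comprehension collecting all non-NULL values, deduplication expressed as a positional first-occurrence filter (keep v at i iff vals.index(v) == i, no seen structure at all), and a final slice, with an up-front guard for non-positive max_samples.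
-- intended difference: When max_samples <= 0 and some row has a non-NULL value for the column, A still returns a one-element list (it appends the first value before checking the bound), while B returns the empty list, the intended result of asking for at most zero samples. — e.g. on get_sample_values([[("c", "x")]], "c", 0): A returns ["x"], B returns []
import Mathlib
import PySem

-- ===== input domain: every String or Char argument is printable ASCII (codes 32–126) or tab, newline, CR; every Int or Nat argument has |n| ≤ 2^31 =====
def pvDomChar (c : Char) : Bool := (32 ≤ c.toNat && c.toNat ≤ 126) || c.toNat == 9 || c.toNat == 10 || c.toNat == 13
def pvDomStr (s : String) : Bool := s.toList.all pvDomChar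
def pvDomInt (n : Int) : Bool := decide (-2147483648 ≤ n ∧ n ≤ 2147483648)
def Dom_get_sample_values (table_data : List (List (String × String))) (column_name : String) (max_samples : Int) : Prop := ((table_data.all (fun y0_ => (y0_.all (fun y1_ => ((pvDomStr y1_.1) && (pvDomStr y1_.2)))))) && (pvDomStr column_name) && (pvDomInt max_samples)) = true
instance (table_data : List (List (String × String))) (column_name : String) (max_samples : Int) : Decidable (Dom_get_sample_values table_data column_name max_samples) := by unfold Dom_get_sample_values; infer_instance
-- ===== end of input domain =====

-- B replaces A's early-breaking seen-list loop by staged passes: collect all non-NULL values,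
-- dedup by a positional first-occurrence filter (vals.index(v) == i), then slice; alternative
-- decomposition, not claimed faster.

-- ===== PORT A =====
-- the for-loop of A: rows still to visit, accumulated 'values'; break = returning early
def gsvLoop (column_name : String) (max_samples : Int) :
    List (List (String × String)) → List String → List String
  | [], values => values
  | row :: rest, values =>
    match (PySem.Dict.mk row).get? column_name with      -- 'column_name in row' + 'row[column_name]'
    | some value =>
      if value ≠ "NULL" then
        if value ∉ values then
          if ((values ++ [value]).length : Int) ≥ max_samples then values ++ [value]
          else gsvLoop column_name max_samples rest (values ++ [value])
        else gsvLoop column_name max_samples rest values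
      else gsvLoop column_name max_samples rest values
    | none => gsvLoop column_name max_samples rest values

def get_sample_values (table_data : List (List (String × String))) (column_name : String) (max_samples : Int) : List String :=
  if table_data = [] then []
  else gsvLoop column_name max_samples table_data []

-- ===== PORT B =====
def get_sample_values_alt (table_data : List (List (String × String))) (column_name : String) (max_samples : Int) : List String :=
  -- if max_samples <= 0: return []
  if max_samples ≤ 0 then []
  else
    -- vals = [row[column_name] for row in table_data if column_name in row and row[column_name] != "NULL"]
    let vals := table_data.filterMap (fun row =>
      match (PySem.Dict.mk row).get? column_name with
      | some v => if v ≠ "NULL" then some v else none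
      | none => none)
    -- uniq = [v for i, v in enumerate(vals) if vals.index(v) == i]
    let uniq := ((PySem.List.enumerate vals 0).filter
      (fun p => match PySem.List.index? vals p.2 with      -- vals.index(p.2), always found here
                | some k => (k : Int) == p.1
                | none => false)).map Prod.snd
    -- return uniq[:max_samples]
    PySem.List.slice uniq none (some max_samples)

-- ===== PRECONDITION & SPEC =====
-- When max_samples ≤ 0 and some row has a non-NULL value for the column, A still returns a
-- one-element list (it appends the first value before checking the bound), while B returns [],
-- the intended result of asking for at most zero samples.
def D_get_sample_values (table_data : List (List (String × String))) (column_name : String) (max_samples : Int) : Prop :=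
  max_samples ≤ 0 ∧ ∃ row ∈ table_data, (((PySem.Dict.mk row).get? column_name).getD "NULL") ≠ "NULL"
instance (table_data : List (List (String × String))) (column_name : String) (max_samples : Int) : Decidable (D_get_sample_values table_data column_name max_samples) := by unfold D_get_sample_values; infer_instance

def Spec_get_sample_values (table_data : List (List (String × String))) (column_name : String) (max_samples : Int) (out : List String) : Prop := ¬ D_get_sample_values table_data column_name max_samples → out = get_sample_values_alt table_data column_name max_samples
instance (table_data : List (List (String × String))) (column_name : String) (max_samples : Int) (out : List String) : Decidable (Spec_get_sample_values table_data column_name max_samples out) := by unfold Spec_get_sample_values; infer_instance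

def pvDiffWitness_get_sample_values : (List (List (String × String))) × String × Int := ([[("c", "x")]], "c", 0)
def pvDiffWitnessOut_get_sample_values : (List String) × (List String) := (["x"], [])

-- ===== CLAIM =====
def Claim_unchanged_get_sample_values : Prop := ∀ (table_data : List (List (String × String))) (column_name : String) (max_samples : Int), Dom_get_sample_values table_data column_name max_samples → Spec_get_sample_values table_data column_name max_samples (get_sample_values table_data column_name max_samples)
def Claim_changed_get_sample_values : Prop := Dom_get_sample_values (pvDiffWitness_get_sample_values.1) (pvDiffWitness_get_sample_values.2.1) (pvDiffWitness_get_sample_values.2.2) ∧ D_get_sample_values (pvDiffWitness_get_sample_values.1) (pvDiffWitness_get_sample_values.2.1) (pvDiffWitness_get_sample_values.2.2) ∧ get_sample_values (pvDiffWitness_get_sample_values.1) (pvDiffWitness_get_sample_values.2.1) (pvDiffWitness_get_sample_values.2.2) = pvDiffWitnessOut_get_sample_values.1 ∧ get_sample_values_alt (pvDiffWitness_get_sample_values.1) (pvDiffWitness_get_sample_values.2.1) (pvDiffWitness_get_sample_values.2.2) = pvDiffWitnessOut_get_sample_values.2 ∧ pvDiffWitnessOut_get_sample_values.1 ≠ 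pvDiffWitnessOut_get_sample_values.2
def Claim_exact_get_sample_values : Prop := ∀ (table_data : List (List (String × String))) (column_name : String) (max_samples : Int), Dom_get_sample_values table_data column_name max_samples → D_get_sample_values table_data column_name max_samples → get_sample_values table_data column_name max_samples ≠ get_sample_values_alt table_data column_name max_samples

-- ===== LEMMAS AND PROOFS =====

-- the non-NULL values of the column, in row order (the list B's first comprehension builds)
def gsvVals (column_name : String) (table_data : List (List (String × String))) : List String :=
  table_data.filterMap (fun row =>
    match (PySem.Dict.mk row).get? column_name with
    | some v => if v ≠ "NULL" then some v else none
    | none => none)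

-- A's loop, collapsed to a loop over the value list
def gsvVLoop (max_samples : Int) : List String → List String → List String
  | [], values => values
  | v :: rest, values =>
    if v ∉ values then
      if ((values ++ [v]).length : Int) ≥ max_samples then values ++ [v]
      else gsvVLoop max_samples rest (values ++ [v])
    else gsvVLoop max_samples rest values

-- dedup of l relative to already-seen acc
def gsvDD : List String → List String → List String
  | [], _ => []
  | v :: r, acc => if v ∈ acc then gsvDD r acc else v :: gsvDD r (acc ++ [v])

theorem gsvLoop_eq_vloop (col : String) (ms : Int) :
    ∀ (td : List (List (String × String))) (acc : List String),
      gsvLoop col ms td acc = gsvVLoop ms (gsvVals col td) acc := by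
  intro td
  induction td with
  | nil => intro acc; simp [gsvLoop, gsvVals, gsvVLoop]
  | cons row rest ih =>
    intro acc
    simp only [gsvLoop, gsvVals, List.filterMap_cons]
    cases h : (PySem.Dict.mk row).get? col with
    | none => simpa [gsvVals] using ih acc
    | some v =>
      by_cases hnull : v = "NULL"
      · simpa [hnull, gsvVals] using ih acc
      · simp only [if_pos hnull, gsvVLoop]
        by_cases hmem : v ∈ acc
        · rw [if_neg (not_not_intro hmem), if_neg (not_not_intro hmem)]
          exact ih acc
        · rw [if_pos hmem, if_pos hmem]
          split
          · rfl
          · exact ih (acc ++ [v])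

theorem gsvVLoop_eq (ms : Int) :
    ∀ (l acc : List String), (acc.length : Int) < max 1 ms →
      gsvVLoop ms l acc = acc ++ (gsvDD l acc).take ((max 1 ms - acc.length).toNat) := by
  intro l
  induction l with
  | nil => intro acc _; simp [gsvVLoop, gsvDD]
  | cons v r ih =>
    intro acc hlt
    simp only [gsvVLoop, gsvDD]
    by_cases hmem : v ∈ acc
    · simpa [hmem] using ih acc hlt
    · simp only [hmem, not_false_eq_true, if_pos, if_neg]
      by_cases hbig : ((acc ++ [v]).length : Int) ≥ ms
      · have hbudget : (max 1 ms - (acc.length : Int)).toNat = 1 := by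
          simp only [List.length_append, List.length_singleton] at hbig
          push_cast at hbig hlt ⊢
          omega
        rw [if_pos hbig, hbudget]
        simp
      · have hms : (acc.length : Int) + 1 < ms := by
          simp only [List.length_append, List.length_singleton] at hbig
          push_cast at hbig
          omega
        have hlt' : (((acc ++ [v]).length : Int)) < max 1 ms := by
          simp only [List.length_append, List.length_singleton]
          push_cast
          omega
        rw [if_neg hbig, ih (acc ++ [v]) hlt']
        have hone : (max 1 ms - (acc.length : Int)).toNat =
            (max 1 ms - ((acc ++ [v]).length : Int)).toNat + 1 := by
          simp only [List.length_append, List.length_singleton]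
          push_cast
          omega
        rw [hone]
        simp [List.take_succ_cons]

theorem gsvDD_set : ∀ (l acc : List String), acc ++ gsvDD l acc = PySem.Set.update acc l := by
  intro l
  induction l with
  | nil => intro acc; simp [gsvDD, PySem.Set.update_nil]
  | cons v r ih =>
    intro acc
    rw [PySem.Set.update_cons]
    by_cases hmem : v ∈ acc
    · rw [PySem.Set.add_of_mem hmem, ← ih acc]
      simp [gsvDD, hmem]
    · rw [PySem.Set.add_of_not_mem hmem, ← ih (acc ++ [v])]
      simp [gsvDD, hmem]

theorem gsvDD_nil (l : List String) : gsvDD l [] = PySem.List.dedup l := by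
  have := gsvDD_set l []
  simpa [PySem.Set.update_nil_left] using this

-- gsvDD only depends on the SET of already-seen values
theorem gsvDD_congr : ∀ (r a b : List String), (∀ x, x ∈ a ↔ x ∈ b) → gsvDD r a = gsvDD r b := by
  intro r
  induction r with
  | nil => intro a b _; simp [gsvDD]
  | cons v t ih =>
    intro a b hab
    simp only [gsvDD]
    by_cases hv : v ∈ a
    · rw [if_pos hv, if_pos ((hab v).mp hv)]
      exact ih a b hab
    · rw [if_neg hv, if_neg (fun h => hv ((hab v).mpr h))]
      refine congrArg (v :: ·) (ih _ _ ?_)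
      intro x; simp only [List.mem_append, List.mem_singleton]
      exact or_congr (hab x) Iff.rfl

-- B's first-occurrence filter computes gsvDD (relative to the prefix acc of the searched list)
theorem gsvFO : ∀ (l acc : List String),
    (((PySem.List.enumerate l (acc.length : Int)).filter
      (fun p => match PySem.List.index? (acc ++ l) p.2 with
                | some k => (k : Int) == p.1
                | none => false)).map Prod.snd)
      = gsvDD l acc := by
  intro l
  induction l with
  | nil => intro acc; simp [PySem.List.enumerate_nil, gsvDD]
  | cons v r ih =>
    intro acc
    rw [PySem.List.enumerate_cons]
    have hsplit : acc ++ v :: r = (acc ++ [v]) ++ r := by simp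
    have hlen : ((acc ++ [v]).length : Int) = (acc.length : Int) + 1 := by
      simp
    by_cases hmem : v ∈ acc
    · -- head dropped: first occurrence of v is inside acc, at index < acc.length
      have hidx : PySem.List.index? (acc ++ v :: r) v = PySem.List.index? acc v :=
        PySem.List.index?_append_of_mem _ hmem
      obtain ⟨k, hk⟩ := Option.isSome_iff_exists.mp
        ((PySem.List.index?_isSome_iff acc v).mpr hmem)
      have hklt : k < acc.length := by
        obtain ⟨hlt, _, _⟩ := PySem.List.getElem_of_index?_eq_some hk
        exact hlt
      have hcond : (match PySem.List.index? (acc ++ v :: r) v with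
          | some j => (j : Int) == (acc.length : Int)
          | none => false) = false := by
        rw [hidx, hk]
        simp only [beq_eq_false_iff_ne, ne_eq]
        intro h
        omega
      rw [List.filter_cons, hcond]
      simp only [Bool.false_eq_true, if_false, gsvDD, if_pos hmem]
      have := ih (acc ++ [v])
      rw [hlen, ← hsplit] at this
      rw [this]
      exact gsvDD_congr r (acc ++ [v]) acc
        (fun x => by simp only [List.mem_append, List.mem_singleton]
                     constructor
                     · rintro (h | rfl); exact h; exact hmem
                     · exact Or.inl)
    · -- head kept: first occurrence of v is exactly at acc.length
      have hidx : PySem.List.index? (acc ++ v :: r) v = some acc.length := by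
        rw [PySem.List.index?_eq_some_iff]
        exact ⟨acc, r, rfl, rfl, hmem⟩
      have hcond : (match PySem.List.index? (acc ++ v :: r) v with
          | some j => (j : Int) == (acc.length : Int)
          | none => false) = true := by
        rw [hidx]; simp
      rw [List.filter_cons, hcond]
      simp only [if_true, List.map_cons, gsvDD, if_neg hmem]
      have := ih (acc ++ [v])
      rw [hlen, ← hsplit] at this
      rw [this]

theorem gsvVals_def (col : String) (td : List (List (String × String))) :
    (td.filterMap (fun row =>
      match (PySem.Dict.mk row).get? col with
      | some v => if v ≠ "NULL" then some v else none
      | none => none)) = gsvVals col td := rfl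

theorem gsv_alt_eq (td : List (List (String × String))) (col : String) (ms : Int) (hms : ¬ ms ≤ 0) :
    get_sample_values_alt td col ms = (PySem.List.dedup (gsvVals col td)).take ms.toNat := by
  have h := gsvFO (gsvVals col td) []
  simp only [List.nil_append, List.length_nil, Nat.cast_zero] at h
  simp only [get_sample_values_alt, if_neg hms, gsvVals_def]
  rw [h, gsvDD_nil, PySem.List.slice_to _ (by omega)]

theorem gsv_a_eq (td : List (List (String × String))) (col : String) (ms : Int) (h : td ≠ []) :
    get_sample_values td col ms = (PySem.List.dedup (gsvVals col td)).take (max 1 ms).toNat := by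
  unfold get_sample_values
  rw [if_neg h, gsvLoop_eq_vloop, gsvVLoop_eq ms _ [] (by simp), gsvDD_nil]
  simp

theorem gsvVals_eq_nil (td : List (List (String × String))) (col : String)
    (h : ∀ row ∈ td, (((PySem.Dict.mk row).get? col).getD "NULL") = "NULL") :
    gsvVals col td = [] := by
  unfold gsvVals
  rw [List.filterMap_eq_nil_iff]
  intro row hrow
  have := h row hrow
  cases hg : (PySem.Dict.mk row).get? col with
  | none => simp
  | some v => rw [hg] at this; simp at this; simp [this]

theorem gsvVals_ne_nil (td : List (List (String × String))) (col : String)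
    (h : ∃ row ∈ td, (((PySem.Dict.mk row).get? col).getD "NULL") ≠ "NULL") :
    gsvVals col td ≠ [] := by
  obtain ⟨row, hrow, hv⟩ := h
  cases hg : (PySem.Dict.mk row).get? col with
  | none => rw [hg] at hv; simp at hv
  | some v =>
    rw [hg] at hv; simp only [Option.getD_some] at hv
    have : v ∈ gsvVals col td := by
      unfold gsvVals
      rw [List.mem_filterMap]
      exact ⟨row, hrow, by simp [hg, hv]⟩
    exact fun hnil => by simp [hnil] at this

-- ===== VERDICT =====
theorem get_sample_values_spec : Claim_unchanged_get_sample_values := by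
  unfold Claim_unchanged_get_sample_values
  intro td col ms _ hnd
  by_cases hms : ms ≤ 0
  · -- guard branch of B; outside D_ every value is NULL, so A returns [] too
    have hall : ∀ row ∈ td, (((PySem.Dict.mk row).get? col).getD "NULL") = "NULL" := by
      intro row hrow
      by_contra hne
      exact hnd ⟨hms, row, hrow, hne⟩
    unfold get_sample_values_alt
    rw [if_pos hms]
    by_cases htd : td = []
    · subst htd; simp [get_sample_values]
    · rw [gsv_a_eq td col ms htd, gsvVals_eq_nil td col hall]
      simp [PySem.List.dedup]
  · by_cases htd : td = []
    · subst htd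
      rw [gsv_alt_eq [] col ms hms]
      simp [get_sample_values, gsvVals, PySem.List.dedup]
    · rw [gsv_a_eq td col ms htd, gsv_alt_eq td col ms hms]
      rw [max_eq_right (by omega)]

theorem get_sample_values_changed : Claim_changed_get_sample_values := by
  unfold Claim_changed_get_sample_values; decide

theorem get_sample_values_tight : Claim_exact_get_sample_values := by
  unfold Claim_exact_get_sample_values
  intro td col ms _ hd
  obtain ⟨hms, hrow⟩ := hd
  have htd : td ≠ [] := by
    obtain ⟨row, hrow, _⟩ := hrow
    exact fun h => by simp [h] at hrow
  rw [gsv_a_eq td col ms htd]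
  unfold get_sample_values_alt
  rw [if_pos hms]
  have hvals : gsvVals col td ≠ [] := gsvVals_ne_nil td col hrow
  have hded : PySem.List.dedup (gsvVals col td) ≠ [] := by
    obtain ⟨v, hv⟩ := List.exists_mem_of_ne_nil _ hvals
    have : v ∈ PySem.List.dedup (gsvVals col td) := by
      rw [PySem.List.mem_dedup]; exact hv
    exact fun h => by rw [h] at this; simp at this
  have h1 : (max 1 ms).toNat = 1 := by omega
  rw [h1]
  cases hc : PySem.List.dedup (gsvVals col td) with
  | nil => exact absurd hc hded
  | cons x l => simp
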